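-- pv_equiv track=rewrite | github.com/estebanbula/isMutant | mutants/ismutant/views.py | searchHorizontal
-- ===== SOURCE A (Python) =====
-- __sequences = ['AAAA', 'TTTT', 'CCCC', 'GGGG']
--
-- def searchHorizontal(dna, i, j):
--     matches = 0
--     if j < len(dna[i]) - 3:
--         data = dna[i][j]+dna[i][j+1]+dna[i][j+2]+dna[i][j+3]
--         for seq in __sequences:
--             if seq == data:
--                 matches += 1
--     return matches
-- ===== SOURCE B (Python) =====
-- def searchHorizontal(dna, i, j):
--     row = dna[i]
--     if j >= len(row) - 3:
--         return 0
--     window = {row[j], row[j + 1], row[j + 2], row[j + 3]}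
--     return 1 if len(window) == 1 and window <= {'A', 'T', 'C', 'G'} else 0
-- ===== Notes on version B (the rewrite author's own statement) =====
-- stated objective: alternative
-- what changed: B builds the 4-char window as a SET and decides via set cardinality (len == 1) plus a subset test against {'A','T','C','G'}, instead of A's concatenating a window string and counting matches in the table ['AAAA','TTTT','CCCC','GGGG']; the guard is inverted into an early return.
import Mathlib
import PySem

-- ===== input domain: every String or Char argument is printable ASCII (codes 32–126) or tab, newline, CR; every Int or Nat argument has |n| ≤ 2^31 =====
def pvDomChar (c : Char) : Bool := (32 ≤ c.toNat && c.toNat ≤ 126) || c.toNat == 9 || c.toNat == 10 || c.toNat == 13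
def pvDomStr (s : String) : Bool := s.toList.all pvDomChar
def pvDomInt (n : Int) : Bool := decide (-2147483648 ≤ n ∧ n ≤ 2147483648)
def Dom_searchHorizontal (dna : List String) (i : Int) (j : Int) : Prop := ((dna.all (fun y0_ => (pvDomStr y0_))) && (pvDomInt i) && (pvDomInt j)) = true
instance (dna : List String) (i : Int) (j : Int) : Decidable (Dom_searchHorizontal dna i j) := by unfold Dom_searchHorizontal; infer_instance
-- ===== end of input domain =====

-- B builds the 4-char window as a set and decides via cardinality-1 plus a subset test
-- against {'A','T','C','G'}, instead of A's window-string concatenation scanned against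
-- the table ['AAAA','TTTT','CCCC','GGGG'] (objective: alternative).


-- ===== PORT A =====
def pvSequences : List String := ["AAAA", "TTTT", "CCCC", "GGGG"]

def searchHorizontal (dna : List String) (i : Int) (j : Int) : Int :=
  let matches0 : Int := 0  -- 'matches' is a Lean keyword
  match PySem.List.pyGet? dna i with
  | none => 0  -- dna[i] raises: excluded by Pre_
  | some row =>
    if j < PySem.Str.len row - 3 then
      match PySem.Str.pyGet? row j, PySem.Str.pyGet? row (j+1),
            PySem.Str.pyGet? row (j+2), PySem.Str.pyGet? row (j+3) with
      | some a, some b, some c, some d =>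
        -- data = dna[i][j]+dna[i][j+1]+dna[i][j+2]+dna[i][j+3], kept as its list of characters
        let data : List Char := [a, b, c, d]
        pvSequences.foldl (fun m seq => if seq.toList = data then m + 1 else m) matches0
      | _, _, _, _ => 0  -- an index raises: excluded by Pre_
    else matches0

-- ===== PORT B =====
def searchHorizontal_alt (dna : List String) (i : Int) (j : Int) : Int :=
  ((PySem.List.pyGet? dna i).bind (fun row =>  -- row = dna[i]; none = IndexError, excluded by Pre_
    if PySem.Str.len row - 3 ≤ j then some 0  -- 'if j >= len(row) - 3: return 0'
    else
      (PySem.Str.pyGet? row j).bind fun a =>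
      (PySem.Str.pyGet? row (j+1)).bind fun b =>
      (PySem.Str.pyGet? row (j+2)).bind fun c =>
      (PySem.Str.pyGet? row (j+3)).bind fun d =>
        -- window = {row[j], row[j+1], row[j+2], row[j+3]}
        let window : PySem.Set Char := PySem.Set.ofList [a, b, c, d]
        some (if PySem.Set.len window = 1 ∧
                 PySem.Set.issubset window (PySem.Set.ofList ['A', 'T', 'C', 'G']) = true
              then 1 else 0))).getD 0

-- ===== PRECONDITION & SPEC =====
-- Pre_ excludes exactly the inputs where Python A raises IndexError: i outside dna's
-- index range, or (guard true and) j below -len(dna[i]).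
def pvRowOk (dna : List String) (i : Int) (j : Int) : Bool :=
  match PySem.List.pyGet? dna i with
  | none => false
  | some row => !(decide (j < PySem.Str.len row - 3)) || decide (-(PySem.Str.len row) ≤ j)

def Pre_searchHorizontal (dna : List String) (i : Int) (j : Int) : Prop := pvRowOk dna i j = true
instance (dna : List String) (i : Int) (j : Int) : Decidable (Pre_searchHorizontal dna i j) := by
  unfold Pre_searchHorizontal; infer_instance

def pvWitness_searchHorizontal : List String × Int × Int := (["AAAA"], 0, 0)

def Spec_searchHorizontal (dna : List String) (i : Int) (j : Int) (out : Int) : Prop := out = searchHorizontal_alt dna i j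
instance (dna : List String) (i : Int) (j : Int) (out : Int) : Decidable (Spec_searchHorizontal dna i j out) := by unfold Spec_searchHorizontal; infer_instance

-- ===== CLAIM (what is proved, stated in full; the proofs are below) =====
def Claim_equal_searchHorizontal : Prop := ∀ (dna : List String) (i : Int) (j : Int), Dom_searchHorizontal dna i j → Pre_searchHorizontal dna i j → Spec_searchHorizontal dna i j (searchHorizontal dna i j)

-- ===== LEMMAS AND PROOFS =====
-- The ports are in fact equal on ALL inputs (both return 0 wherever an index lookup
-- would raise), so the equivalence lemma needs neither Dom_ nor Pre_.

-- A singleton (length-1) list has all its members equal.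
theorem len_one_mem_eq {α : Type} {s : List α} (h : s.length = 1) {x y : α}
    (hx : x ∈ s) (hy : y ∈ s) : x = y := by
  match s, h with
  | [z], _ =>
    simp only [List.mem_singleton] at hx hy
    exact hx.trans hy.symm

-- B's set condition on the window is the 'all four equal an alphabet letter' condition.
theorem set_cond (a b c d : Char) :
    (PySem.Set.len (PySem.Set.ofList [a, b, c, d]) = 1 ∧
      PySem.Set.issubset (PySem.Set.ofList [a, b, c, d])
        (PySem.Set.ofList ['A', 'T', 'C', 'G']) = true)
    ↔ ((b = a ∧ c = a ∧ d = a) ∧ (a = 'A' ∨ a = 'T' ∨ a = 'C' ∨ a = 'G')) := by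
  constructor
  · rintro ⟨hlen, hsub⟩
    have hlen' : (PySem.Set.ofList [a, b, c, d] : List Char).length = 1 := by
      simp only [PySem.Set.len] at hlen; exact_mod_cast hlen
    have ha : a ∈ PySem.Set.ofList [a, b, c, d] := by simp [PySem.Set.mem_ofList]
    have hb : b ∈ PySem.Set.ofList [a, b, c, d] := by simp [PySem.Set.mem_ofList]
    have hc : c ∈ PySem.Set.ofList [a, b, c, d] := by simp [PySem.Set.mem_ofList]
    have hd : d ∈ PySem.Set.ofList [a, b, c, d] := by simp [PySem.Set.mem_ofList]
    have hmem := (PySem.Set.issubset_iff _ _).mp hsub a ha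
    rw [PySem.Set.mem_ofList] at hmem
    simp only [List.mem_cons, List.not_mem_nil, or_false] at hmem
    exact ⟨⟨len_one_mem_eq hlen' hb ha, len_one_mem_eq hlen' hc ha,
            len_one_mem_eq hlen' hd ha⟩, hmem⟩
  · rintro ⟨⟨hb, hc, hd⟩, hA⟩
    subst hb; subst hc; subst hd
    rcases hA with h | h | h | h <;> subst h <;> exact ⟨by decide, by decide⟩

-- If the window is not four equal alphabet letters, it matches no table entry.
theorem not_window (x a b c d : Char)
    (h : ¬ ((b = a ∧ c = a ∧ d = a) ∧ (a = 'A' ∨ a = 'T' ∨ a = 'C' ∨ a = 'G')))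
    (hx : x = 'A' ∨ x = 'T' ∨ x = 'C' ∨ x = 'G') : [x, x, x, x] ≠ [a, b, c, d] := by
  intro e
  simp only [List.cons.injEq, and_true] at e
  obtain ⟨e1, e2, e3, e4⟩ := e
  exact h ⟨⟨e2.symm.trans e1, e3.symm.trans e1, e4.symm.trans e1⟩, e1 ▸ hx⟩

-- A's table count of the 4-char window equals the adjacency-plus-alphabet condition.
theorem window_count (a b c d : Char) :
    pvSequences.foldl (fun m seq => if seq.toList = [a, b, c, d] then m + 1 else m) (0 : Int)
      = if (b = a ∧ c = a ∧ d = a) ∧ (a = 'A' ∨ a = 'T' ∨ a = 'C' ∨ a = 'G') then 1 else 0 := by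
  have h1 : "AAAA".toList = ['A','A','A','A'] := rfl
  have h2 : "TTTT".toList = ['T','T','T','T'] := rfl
  have h3 : "CCCC".toList = ['C','C','C','C'] := rfl
  have h4 : "GGGG".toList = ['G','G','G','G'] := rfl
  by_cases h : (b = a ∧ c = a ∧ d = a) ∧ (a = 'A' ∨ a = 'T' ∨ a = 'C' ∨ a = 'G')
  · obtain ⟨⟨hb, hc, hd⟩, hA⟩ := h
    subst hb; subst hc; subst hd
    rcases hA with h | h | h | h <;> subst h <;> decide
  · rw [if_neg h]
    simp only [pvSequences, List.foldl, h1, h2, h3, h4,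
      if_neg (not_window 'A' a b c d h (by decide)),
      if_neg (not_window 'T' a b c d h (by decide)),
      if_neg (not_window 'C' a b c d h (by decide)),
      if_neg (not_window 'G' a b c d h (by decide))]

-- One guarded branch: A's table count equals B's set test (via window_count and set_cond).
theorem branch_eq (a b c d : Char) :
    pvSequences.foldl (fun m seq => if seq.toList = [a, b, c, d] then m + 1 else m) (0 : Int)
      = if PySem.Set.len (PySem.Set.ofList [a, b, c, d]) = 1 ∧
           PySem.Set.issubset (PySem.Set.ofList [a, b, c, d])
             (PySem.Set.ofList ['A', 'T', 'C', 'G']) = true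
        then 1 else 0 := by
  rw [window_count a b c d]
  by_cases h : (b = a ∧ c = a ∧ d = a) ∧ (a = 'A' ∨ a = 'T' ∨ a = 'C' ∨ a = 'G')
  · rw [if_pos h, if_pos ((set_cond a b c d).mpr h)]
  · rw [if_neg h, if_neg (fun hh => h ((set_cond a b c d).mp hh))]

theorem searchHorizontal_eq_alt (dna : List String) (i : Int) (j : Int) :
    searchHorizontal dna i j = searchHorizontal_alt dna i j := by
  unfold searchHorizontal searchHorizontal_alt
  cases PySem.List.pyGet? dna i with
  | none => rfl
  | some row =>
    simp only [Option.bind]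
    by_cases hj : j < PySem.Str.len row - 3
    · rw [if_pos hj, if_neg (by omega : ¬ (PySem.Str.len row - 3 ≤ j))]
      cases ha : PySem.Str.pyGet? row j <;>
      cases hb : PySem.Str.pyGet? row (j+1) <;>
      cases hc : PySem.Str.pyGet? row (j+2) <;>
      cases hd : PySem.Str.pyGet? row (j+3) <;>
        first
        | rfl
        | (rename_i a b c d; exact branch_eq a b c d)
    · rw [if_neg hj, if_pos (by omega : PySem.Str.len row - 3 ≤ j)]
      rfl

theorem searchHorizontal_spec : Claim_equal_searchHorizontal := by
  intro dna i j _ _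
  unfold Spec_searchHorizontal
  exact searchHorizontal_eq_alt dna i j
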